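-- pv_equiv track=rewrite | github.com/NextGenCMB/delensalot | lenscarf/opfilt/bmodes_ninv.py | get_modelmax
-- ===== SOURCE A (Python) =====
-- def get_modelmax(mode):
--
--     assert mode >= 0, mode
--     nmodes = 0
--     l = -1
--     while nmodes - 1 < mode + 4:
--         l += 1
--         nmodes += 2 * l + 1
--
--     return l
-- ===== SOURCE B (Python) =====
-- def get_modelmax(mode):
--     assert mode >= 0, mode
--     # smallest m with m*m >= mode+5, found by binary search; answer is m-1
--     n = mode + 5
--     lo, hi = 0, n
--     while lo < hi:
--         mid = (lo + hi) // 2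
--         if mid * mid >= n:
--             hi = mid
--         else:
--             lo = mid + 1
--     return lo - 1
-- ===== Notes on version B (the rewrite author's own statement) =====
-- stated objective: alternative
-- what changed: replaces the linear accumulate-2l+1 loop by a binary search for the smallest m with m*m >= mode+5, returning m-1
import Mathlib
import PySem

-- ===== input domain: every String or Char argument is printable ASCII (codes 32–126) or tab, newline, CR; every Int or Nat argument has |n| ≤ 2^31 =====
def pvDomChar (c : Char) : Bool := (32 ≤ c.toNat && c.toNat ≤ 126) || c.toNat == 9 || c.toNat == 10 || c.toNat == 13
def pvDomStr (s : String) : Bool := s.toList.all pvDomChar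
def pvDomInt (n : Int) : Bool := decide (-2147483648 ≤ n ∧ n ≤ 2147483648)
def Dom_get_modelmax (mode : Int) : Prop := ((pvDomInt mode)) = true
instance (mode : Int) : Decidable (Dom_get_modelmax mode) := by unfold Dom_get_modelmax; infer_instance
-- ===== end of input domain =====

-- B replaces A's linear accumulate-(2l+1) loop by a binary search for the smallest m with m*m ≥ mode+5 (alternative algorithm).

-- ===== PORT A =====
-- A's while-loop; state k = l + 1 (a Nat, since l starts at -1 and only increments),
-- nmodes is the running sum; returns l = k - 1 when the loop guard fails.
def pvLoopA (mode : Int) (k : Nat) (nmodes : Int) : Int :=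
  if nmodes - 1 < mode + 4 then pvLoopA mode (k + 1) (nmodes + 2 * (k : Int) + 1)
  else (k : Int) - 1
termination_by (mode + 5 - nmodes).toNat
decreasing_by omega

def get_modelmax (mode : Int) : Int := pvLoopA mode 0 0

-- ===== PORT B =====
-- Source B's binary-search loop: smallest m in [lo, hi] with m*m ≥ n.
def pvBSearch (n lo hi : Int) : Int :=
  if lo < hi then
    let mid := PySem.Int.floordiv (lo + hi) 2
    if mid * mid ≥ n then pvBSearch n lo mid
    else pvBSearch n (mid + 1) hi
  else lo
termination_by (hi - lo).toNat
decreasing_by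
  · have h := PySem.Int.floordiv_mul_add_mod (lo + hi) 2
    have h2 : 0 ≤ PySem.Int.mod (lo + hi) 2 ∧ PySem.Int.mod (lo + hi) 2 < 2 := by
      constructor
      · exact PySem.Int.mod_nonneg (lo + hi) (by omega)
      · exact PySem.Int.mod_lt (lo + hi) (by omega)
    omega
  · have h := PySem.Int.floordiv_mul_add_mod (lo + hi) 2
    have h2 : 0 ≤ PySem.Int.mod (lo + hi) 2 ∧ PySem.Int.mod (lo + hi) 2 < 2 := by
      constructor
      · exact PySem.Int.mod_nonneg (lo + hi) (by omega)
      · exact PySem.Int.mod_lt (lo + hi) (by omega)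
    omega

def get_modelmax_alt (mode : Int) : Int := pvBSearch (mode + 5) 0 (mode + 5) - 1

-- ===== PRECONDITION & SPEC =====
-- Pre_ excludes mode < 0, on which A's assert raises AssertionError.
def Pre_get_modelmax (mode : Int) : Prop := 0 ≤ mode
instance (mode : Int) : Decidable (Pre_get_modelmax mode) := by unfold Pre_get_modelmax; infer_instance
def pvWitness_get_modelmax : Int := 7

def Spec_get_modelmax (mode : Int) (out : Int) : Prop := out = get_modelmax_alt mode
instance (mode : Int) (out : Int) : Decidable (Spec_get_modelmax mode out) := by unfold Spec_get_modelmax; infer_instance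

-- ===== CLAIM (what is proved, stated in full; the proofs are below) =====
def Claim_equal_get_modelmax : Prop := ∀ (mode : Int), Dom_get_modelmax mode → Pre_get_modelmax mode → Spec_get_modelmax mode (get_modelmax mode)

-- ===== LEMMAS AND PROOFS =====

-- A's loop, started at k with nmodes = k², returns m - 1 where m is the least
-- index ≥ k whose square reaches mode + 5.
theorem pvLoopA_spec (mode : Int) (k : Nat) (nmodes : Int)
    (hn : nmodes = (k : Int) * (k : Int)) :
    ∃ m : Nat, pvLoopA mode k nmodes = (m : Int) - 1 ∧ k ≤ m ∧
      mode + 5 ≤ (m : Int) * (m : Int) ∧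
      ∀ j : Nat, k ≤ j → j < m → (j : Int) * (j : Int) < mode + 5 := by
  induction k, nmodes using pvLoopA.induct mode with
  | case1 k nmodes hcond ih =>
    subst hn
    obtain ⟨m, hm, hkm, hsq, hlt⟩ := ih (by push_cast; ring)
    refine ⟨m, ?_, by omega, hsq, ?_⟩
    · rw [pvLoopA]; simp [hcond, hm]
    · intro j hkj hjm
      rcases Nat.eq_or_lt_of_le hkj with h | h
      · subst h; omega
      · exact hlt j h hjm
  | case2 k nmodes hcond =>
    subst hn
    refine ⟨k, ?_, le_refl _, by omega, by omega⟩
    rw [pvLoopA]; simp [hcond]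

-- B's binary search returns the least nonnegative r with r² ≥ n, given the
-- standard invariant.
theorem pvBSearch_spec (n : Int) : ∀ lo hi : Int, 0 ≤ lo → lo ≤ hi →
    n ≤ hi * hi →
    (∀ j : Int, 0 ≤ j → j < lo → j * j < n) →
    0 ≤ pvBSearch n lo hi ∧ n ≤ pvBSearch n lo hi * pvBSearch n lo hi ∧
      ∀ j : Int, 0 ≤ j → j < pvBSearch n lo hi → j * j < n := by
  intro lo hi
  induction lo, hi using pvBSearch.induct n with
  | case1 lo hi hlt mid hge ih =>
    intro h0 hle hhi hbelow
    have hmid : lo ≤ mid ∧ mid ≤ hi := PySem.Int.floordiv_two_mid_bounds (le_of_lt hlt)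
    rw [pvBSearch]
    simp only [hlt, if_true, ge_iff_le]
    rw [if_pos hge]
    exact ih h0 hmid.1 hge hbelow
  | case2 lo hi hlt mid hge ih =>
    intro h0 hle hhi hbelow
    have hmid : lo ≤ mid ∧ mid ≤ hi := PySem.Int.floordiv_two_mid_bounds (le_of_lt hlt)
    have hm2 : mid * mid < n := by omega
    have hmidlt : mid < hi := by
      rcases lt_or_eq_of_le hmid.2 with h | h
      · exact h
      · rw [h] at hm2; omega
    rw [pvBSearch]
    simp only [hlt, if_true, ge_iff_le]
    rw [if_neg hge]
    refine ih (by omega) (by omega) hhi ?_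
    intro j hj0 hj
    have : j * j ≤ mid * mid := by nlinarith
    omega
  | case3 lo hi hlt =>
    intro h0 hle hhi hbelow
    have : lo = hi := by omega
    rw [pvBSearch]; rw [if_neg hlt]
    subst this
    exact ⟨h0, hhi, hbelow⟩

-- ===== VERDICT (by name: the statement is the Claim_ definition above) =====
theorem get_modelmax_spec : Claim_equal_get_modelmax := by
  intro mode _ hpre
  replace hpre : 0 ≤ mode := hpre
  unfold Spec_get_modelmax get_modelmax get_modelmax_alt
  have hA := pvLoopA_spec mode 0 0 (by norm_num)
  obtain ⟨m, hm, -, hsq, hlt⟩ := hA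
  have hn5 : (5 : Int) ≤ mode + 5 := by omega
  have hB := pvBSearch_spec (mode + 5) 0 (mode + 5) (le_refl 0) (by omega)
    (by nlinarith) (by omega)
  obtain ⟨hr0, hrsq, hrlt⟩ := hB
  set r := pvBSearch (mode + 5) 0 (mode + 5) with hr
  rw [hm]
  -- both m and r are the least nonnegative integer whose square reaches mode+5
  have : (m : Int) = r := by
    rcases lt_trichotomy (m : Int) r with h | h | h
    · have := hrlt (m : Int) (by positivity) h
      omega
    · exact h
    · have hj := hlt r.toNat (Nat.zero_le _) (by omega)
      have : ((r.toNat : Int)) = r := Int.toNat_of_nonneg hr0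
      rw [this] at hj
      omega
  omega
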